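-- pv_equiv track=rewrite | github.com/vicre/api.security.ait.dtu.dk | backend/app-main/defender/delegate_sync.py | _escape_ldap_value
-- ===== SOURCE A (Python) =====
-- def _escape_ldap_value(value: str) -> str:
--     """Escape characters used in LDAP filters."""
--
--     replacements = {
--         "\\": r"\5c",
--         "*": r"\2a",
--         "(": r"\28",
--         ")": r"\29",
--         "\x00": r"\00",
--     }
--     return "".join(replacements.get(char, char) for char in value)
-- ===== SOURCE B (Python) =====
-- def _escape_ldap_value(value: str) -> str:
--     """Escape characters used in LDAP filters."""
--     # Backslash must be replaced first so escapes we introduce are not re-escaped.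
--     return (
--         value.replace("\\", "\\5c")
--         .replace("*", "\\2a")
--         .replace("(", "\\28")
--         .replace(")", "\\29")
--         .replace("\x00", "\\00")
--     )
-- ===== Notes on version B (the rewrite author's own statement) =====
-- stated objective: faster
-- what changed: Replaced the per-character dict-lookup/join generator pass with a chain of whole-string str.replace scans (backslash escaped first so later replacements are not re-escaped), which runs in C instead of a Python-level loop.
import Mathlib
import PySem

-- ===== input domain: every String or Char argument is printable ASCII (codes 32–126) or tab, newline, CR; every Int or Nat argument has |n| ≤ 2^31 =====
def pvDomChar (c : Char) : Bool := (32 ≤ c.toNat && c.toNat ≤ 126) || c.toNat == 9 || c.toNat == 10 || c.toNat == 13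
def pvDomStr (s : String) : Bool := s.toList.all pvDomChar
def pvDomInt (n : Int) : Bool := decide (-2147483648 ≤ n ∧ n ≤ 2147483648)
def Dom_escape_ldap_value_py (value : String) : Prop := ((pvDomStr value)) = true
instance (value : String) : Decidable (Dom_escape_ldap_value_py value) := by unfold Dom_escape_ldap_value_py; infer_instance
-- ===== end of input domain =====

-- B replaces A's per-character dict-lookup/join pass with chained whole-string replace scans (backslash first); return-value equivalence proved on the domain.


-- ===== PORT A =====
-- the 'replacements' dict, built in insertion order
def pvReplacements : PySem.Dict String String :=
  ((((PySem.Dict.empty.insert "\\" "\\5c").insert "*" "\\2a").insert "(" "\\28").insert ")" "\\29").insert "\x00" "\\00"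

-- "".join(replacements.get(char, char) for char in value)
def escape_ldap_value_py (value : String) : String :=
  PySem.Str.join "" (value.toList.map (fun ch =>
    pvReplacements.getD (String.ofList [ch]) (String.ofList [ch])))

-- ===== PORT B =====
def escape_ldap_value_py_alt (value : String) : String :=
  PySem.Str.replace
    (PySem.Str.replace
      (PySem.Str.replace
        (PySem.Str.replace
          (PySem.Str.replace value "\\" "\\5c")
          "*" "\\2a")
        "(" "\\28")
      ")" "\\29")
    "\x00" "\\00"

-- ===== PRECONDITION & SPEC =====
def Spec_escape_ldap_value_py (value : String) (out : String) : Prop := out = escape_ldap_value_py_alt value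
instance (value : String) (out : String) : Decidable (Spec_escape_ldap_value_py value out) := by unfold Spec_escape_ldap_value_py; infer_instance

-- ===== CLAIM (what is proved, stated in full; the proofs are below) =====
def Claim_equal_escape_ldap_value_py : Prop := ∀ (value : String), Dom_escape_ldap_value_py value → Spec_escape_ldap_value_py value (escape_ldap_value_py value)

-- ===== LEMMAS AND PROOFS =====

-- single-character substitution as a flatMap step
def pvSub (c : Char) (new : List Char) (x : Char) : List Char :=
  if x = c then new else [x]

-- both per-character substitutions, as one function on characters
def pvFA (c : Char) : List Char :=
  if c = '\\' then ['\\','5','c']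
  else if c = '*' then ['\\','2','a']
  else if c = '(' then ['\\','2','8']
  else if c = ')' then ['\\','2','9']
  else if c = '\x00' then ['\\','0','0']
  else [c]

theorem pvReplaceGo_single (c : Char) (new : List Char) :
    ∀ (l acc : List Char) (fuel : Nat), l.length ≤ fuel →
      PySem.Chars.replace.go [c] new fuel l acc
        = acc.reverse ++ l.flatMap (pvSub c new) := by
  intro l
  induction l with
  | nil =>
    intro acc fuel _
    cases fuel <;> simp [PySem.Chars.replace.go]
  | cons x t ih =>
    intro acc fuel hfuel
    cases fuel with
    | zero => simp at hfuel
    | succ fuel =>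
      have ht : t.length ≤ fuel := by simpa using hfuel
      have hgo : PySem.Chars.replace.go [c] new (fuel+1) (x :: t) acc
          = if c = x then PySem.Chars.replace.go [c] new fuel t (new.reverse ++ acc)
            else PySem.Chars.replace.go [c] new fuel t (x :: acc) := by
        simp [PySem.Chars.replace.go, List.isPrefixOf]
      rw [hgo]
      by_cases hx : c = x
      · subst hx
        rw [if_pos rfl, ih _ fuel ht]
        simp [pvSub]
      · rw [if_neg hx, ih _ fuel ht]
        simp [pvSub, Ne.symm hx]

-- single-character replace on char lists is a flatMap of the substitution
theorem pvReplace_single (c : Char) (new l : List Char) :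
    PySem.Chars.replace l [c] new = l.flatMap (pvSub c new) := by
  rw [PySem.Chars.replace]
  simp only [List.isEmpty_cons, Bool.false_eq_true, if_false]
  exact pvReplaceGo_single c new l [] l.length le_rfl

-- "".join on char lists concatenates
theorem pvJoin_nil (parts : List (List Char)) :
    PySem.Chars.join [] parts = parts.flatMap id := by
  rw [PySem.Chars.join, List.intercalate, List.flatMap_id]
  induction parts with
  | nil => rfl
  | cons p ps ih =>
    cases ps with
    | nil => rfl
    | cons q qs =>
      rw [show List.intersperse ([]:List Char) (p::q::qs) = p :: [] :: List.intersperse [] (q::qs) by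
            simp [List.intersperse]]
      simp only [List.flatten_cons, List.nil_append] at *
      rw [ih]

-- A's dict lookup, characterised per character
theorem pvGetD_eq (c : Char) :
    (pvReplacements.getD (String.ofList [c]) (String.ofList [c])).toList = pvFA c := by
  by_cases h1 : c = '\\'
  · subst h1; decide
  by_cases h2 : c = '*'
  · subst h2; decide
  by_cases h3 : c = '('
  · subst h3; decide
  by_cases h4 : c = ')'
  · subst h4; decide
  by_cases h5 : c = '\x00'
  · subst h5; decide
  have key : ∀ (d : Char) (s : String), s.toList = [d] → c ≠ d → (s == String.ofList [c]) = false := by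
    intro d s hs hd
    simp only [beq_eq_false_iff_ne, ne_eq]
    intro h
    apply hd
    have h' := congrArg String.toList h
    rw [hs] at h'
    simp at h'
    exact h'.symm
  have hitems : pvReplacements.items = [("\\","\\5c"),("*","\\2a"),("(","\\28"),(")","\\29"),("\x00","\\00")] := by decide
  rw [PySem.Dict.getD, PySem.Dict.get?, hitems]
  simp only [List.find?, key '\\' "\\" (by decide) h1, key '*' "*" (by decide) h2,
    key '(' "(" (by decide) h3, key ')' ")" (by decide) h4, key '\x00' "\x00" (by decide) h5]
  simp [pvFA, h1, h2, h3, h4, h5]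

theorem pvA_toList (value : String) :
    (escape_ldap_value_py value).toList = value.toList.flatMap pvFA := by
  rw [escape_ldap_value_py, PySem.Str.toList_join]
  rw [show ("" : String).toList = [] from rfl, List.map_map, pvJoin_nil]
  rw [List.flatMap_id, List.flatMap]
  exact congrArg List.flatten (List.map_congr_left (fun ch _ => pvGetD_eq ch))

-- the five chained substitutions compose to pvFA
theorem pvCompose (c : Char) :
    List.flatMap (fun x1 => List.flatMap (fun x2 => List.flatMap (fun x3 =>
      List.flatMap (pvSub '\x00' ['\\','0','0']) (pvSub ')' ['\\','2','9'] x3))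
        (pvSub '(' ['\\','2','8'] x2)) (pvSub '*' ['\\','2','a'] x1))
      (pvSub '\\' ['\\','5','c'] c) = pvFA c := by
  by_cases h1 : c = '\\'
  · subst h1; decide
  by_cases h2 : c = '*'
  · subst h2; decide
  by_cases h3 : c = '('
  · subst h3; decide
  by_cases h4 : c = ')'
  · subst h4; decide
  by_cases h5 : c = '\x00'
  · subst h5; decide
  simp [pvSub, pvFA, h1, h2, h3, h4, h5]

theorem pvB_toList (value : String) :
    (escape_ldap_value_py_alt value).toList = value.toList.flatMap pvFA := by
  rw [escape_ldap_value_py_alt]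
  simp only [PySem.Str.toList_replace]
  rw [show ("\\" : String).toList = ['\\'] from rfl, show ("*" : String).toList = ['*'] from rfl,
    show ("(" : String).toList = ['('] from rfl, show (")" : String).toList = [')'] from rfl,
    show ("\x00" : String).toList = ['\x00'] from rfl,
    show ("\\5c" : String).toList = ['\\','5','c'] from rfl,
    show ("\\2a" : String).toList = ['\\','2','a'] from rfl,
    show ("\\28" : String).toList = ['\\','2','8'] from rfl,
    show ("\\29" : String).toList = ['\\','2','9'] from rfl,
    show ("\\00" : String).toList = ['\\','0','0'] from rfl]
  rw [pvReplace_single, pvReplace_single, pvReplace_single, pvReplace_single, pvReplace_single]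
  simp only [List.flatMap_assoc]
  congr 1
  funext c
  exact pvCompose c

-- ===== VERDICT (by name: the statement is the Claim_ definition above) =====
theorem escape_ldap_value_py_spec : Claim_equal_escape_ldap_value_py := by
  intro value _
  unfold Spec_escape_ldap_value_py
  have h : (escape_ldap_value_py value).toList = (escape_ldap_value_py_alt value).toList := by
    rw [pvA_toList, pvB_toList]
  exact String.toList_inj.mp h
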